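-- pv_equiv track=rewrite | github.com/jmkingsf/applenotes-organization | applenotes_organization/tools/applescript_runner.py | parse_applescript_list
-- ===== SOURCE A (Python) =====
-- def parse_applescript_list(output: str) -> list:
--     """
--     Parse AppleScript list output into Python list.
--
--     AppleScript lists are typically comma-separated with possible quotes.
--
--     Args:
--         output: Raw output from AppleScript
--
--     Returns:
--         Parsed list of items
--     """
--     if not output:
--         return []
--
--     # Handle quoted strings
--     items = []
--     current = ""
--     in_quotes = False
--
--     for char in output:
--         if char == '"':
--             in_quotes = not in_quotes
--         elif char == "," and not in_quotes:
--             items.append(current.strip().strip('"'))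
--             current = ""
--             continue
--
--         current += char
--
--     if current:
--         items.append(current.strip().strip('"'))
--
--     return [item for item in items if item]
-- ===== SOURCE B (Python) =====
-- def parse_applescript_list(output: str) -> list:
--     """Parse AppleScript list output: split on every comma, then merge
--     fragments back while the accumulated quote count is odd (an unquoted
--     comma sits exactly where the preceding quote count is even)."""
--     segments = []
--     buf = None
--     for part in output.split(','):
--         buf = part if buf is None else buf + ',' + part
--         if buf.count('"') % 2 == 0:
--             segments.append(buf)
--             buf = None
--     if buf is not None:
--         segments.append(buf)
--     items = [seg.strip().strip('"') for seg in segments]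
--     return [item for item in items if item]
-- ===== Notes on version B (the rewrite author's own statement) =====
-- stated objective: faster
-- what changed: Replaces A's character-by-character in_quotes state machine with a split-on-every-comma pass whose fragments are re-merged while the buffer's accumulated quote count is odd, then the same strip/filter.
import Mathlib
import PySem

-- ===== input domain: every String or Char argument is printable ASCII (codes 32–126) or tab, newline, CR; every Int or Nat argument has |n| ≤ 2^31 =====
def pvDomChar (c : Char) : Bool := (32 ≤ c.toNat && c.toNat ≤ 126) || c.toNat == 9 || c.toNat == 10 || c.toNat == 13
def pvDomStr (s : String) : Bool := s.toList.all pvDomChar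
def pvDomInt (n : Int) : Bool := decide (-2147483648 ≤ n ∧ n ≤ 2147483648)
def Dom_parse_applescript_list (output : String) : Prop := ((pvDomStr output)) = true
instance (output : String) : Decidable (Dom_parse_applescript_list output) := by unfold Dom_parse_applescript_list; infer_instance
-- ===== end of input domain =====

-- B replaces A's char-by-char in_quotes scanner by a split-on-every-comma pass whose
-- fragments are re-merged while the accumulated '"'-count is odd (alternative decomposition).

-- shared primitive: seg.strip().strip('"')  (both Pythons apply exactly this)
def pvProc (cs : List Char) : List Char :=
  PySem.Chars.stripChars (PySem.Chars.strip cs) ['"']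

-- ===== PORT A =====
-- A's loop state: (items already appended, current, in_quotes)
def pvAStep (st : List (List Char) × List Char × Bool) (c : Char) :
    List (List Char) × List Char × Bool :=
  if c = '"' then (st.1, st.2.1 ++ [c], !st.2.2)
  else if c = ',' ∧ st.2.2 = false then (st.1 ++ [pvProc st.2.1], [], st.2.2)
  else (st.1, st.2.1 ++ [c], st.2.2)

def parse_applescript_list (output : String) : List String :=
  if output.toList = [] then []
  else
    ((if (output.toList.foldl pvAStep ([], [], false)).2.1 ≠ [] then
        (output.toList.foldl pvAStep ([], [], false)).1 ++
          [pvProc (output.toList.foldl pvAStep ([], [], false)).2.1]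
      else (output.toList.foldl pvAStep ([], [], false)).1).filter
        (fun i => i ≠ [])).map String.mk

-- ===== PORT B =====
-- B's loop state: (completed segments, pending buffer or none)
def pvBStep (st : List (List Char) × Option (List Char)) (p : List Char) :
    List (List Char) × Option (List Char) :=
  let nb := match st.2 with | none => p | some b => b ++ ',' :: p
  if nb.count '"' % 2 = 0 then (st.1 ++ [nb], none) else (st.1, some nb)

def parse_applescript_list_alt (output : String) : List String :=
  (((match ((output.toList.splitOn ',').foldl pvBStep ([], none)).2 with
      | none => ((output.toList.splitOn ',').foldl pvBStep ([], none)).1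
      | some b => ((output.toList.splitOn ',').foldl pvBStep ([], none)).1 ++ [b]).map
        pvProc).filter (fun i => i ≠ [])).map String.mk

-- ===== PRECONDITION & SPEC =====
def Spec_parse_applescript_list (output : String) (out : List String) : Prop := out = parse_applescript_list_alt output
instance (output : String) (out : List String) : Decidable (Spec_parse_applescript_list output out) := by unfold Spec_parse_applescript_list; infer_instance

-- ===== CLAIM (what is proved, stated in full; the proofs are below) =====
def Claim_equal_parse_applescript_list : Prop := ∀ (output : String), Dom_parse_applescript_list output → Spec_parse_applescript_list output (parse_applescript_list output)

-- ===== LEMMAS AND PROOFS =====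

-- reference: A's scanner written as structural recursion, returning the raw segments
def pvRef : List Char → List Char → Bool → List (List Char)
  | [], b, _ => [b]
  | c :: cs, b, q =>
    if c = '"' then pvRef cs (b ++ [c]) (!q)
    else if c = ',' ∧ q = false then b :: pvRef cs [] false
    else pvRef cs (b ++ [c]) q

-- B's merge loop as structural recursion over the parts
def pvGoOpt : Option (List Char) → List (List Char) → List (List Char)
  | none, [] => []
  | some b, [] => [b]
  | buf, p :: ps =>
      let nb := match buf with | none => p | some b => b ++ ',' :: p
      if nb.count '"' % 2 = 0 then nb :: pvGoOpt none ps else pvGoOpt (some nb) ps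

-- same, with the pending prefix glued directly onto the first part
def pvGo' (b : List Char) : List (List Char) → List (List Char)
  | [] => [b]
  | p :: ps =>
      if (b ++ p).count '"' % 2 = 0 then (b ++ p) :: pvGoOpt none ps
      else pvGoOpt (some (b ++ p)) ps

def pvFF (l : List (List Char)) : List (List Char) := l.filter (fun i => i ≠ [])

theorem pvProc_nil : pvProc [] = [] := rfl

theorem pvBfold (parts : List (List Char)) (segs : List (List Char)) (buf : Option (List Char)) :
    (match (parts.foldl pvBStep (segs, buf)).2 with
      | none => (parts.foldl pvBStep (segs, buf)).1
      | some b => (parts.foldl pvBStep (segs, buf)).1 ++ [b]) =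
    segs ++ pvGoOpt buf parts := by
  induction parts generalizing segs buf with
  | nil => cases buf <;> simp [pvGoOpt]
  | cons p ps ih =>
    cases buf with
    | none =>
      simp only [List.foldl_cons, pvBStep, pvGoOpt]
      by_cases h : p.count '"' % 2 = 0
      · rw [if_pos h, if_pos h, ih]; simp
      · rw [if_neg h, if_neg h, ih]
    | some b =>
      simp only [List.foldl_cons, pvBStep, pvGoOpt]
      by_cases h : (b ++ ',' :: p).count '"' % 2 = 0
      · rw [if_pos h, if_pos h, ih]; simp
      · rw [if_neg h, if_neg h, ih]

theorem pvGoOpt_eq_go' (buf : Option (List Char)) (p : List Char) (ps : List (List Char)) :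
    pvGoOpt buf (p :: ps) =
      pvGo' (match buf with | none => [] | some b => b ++ [',']) (p :: ps) := by
  cases buf <;> simp [pvGoOpt, pvGo', List.append_assoc]

theorem pvCount_parity_quote (b : List Char) :
    (decide ((b ++ ['"']).count '"' % 2 = 1)) = !(decide (b.count '"' % 2 = 1)) := by
  simp only [List.count_append, List.count_singleton]
  rcases Nat.mod_two_eq_zero_or_one (b.count '"') with h | h <;> simp [Nat.add_mod, h]

theorem pvSplit (l : List Char) : l.splitOn ',' = l.splitOnP (fun x => x == ',') := rfl

theorem pvSplit_ne_nil (l : List Char) : l.splitOn ',' ≠ [] := by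
  rw [pvSplit]; exact List.splitOnP_ne_nil _ l

theorem pvMain (cs : List Char) (b : List Char) :
    pvGo' b (cs.splitOn ',') = pvRef cs b (decide (b.count '"' % 2 = 1)) := by
  induction cs generalizing b with
  | nil => simp only [List.splitOn_nil, pvGo', pvRef]; split <;> simp [pvGoOpt]
  | cons c cs ih =>
    rcases hsp : cs.splitOn ',' with _ | ⟨p, ps⟩
    · exact absurd hsp (pvSplit_ne_nil cs)
    rw [pvSplit, List.splitOnP_cons, ← pvSplit cs, hsp]
    by_cases hc : c = ','
    · subst hc
      rw [if_pos (by simp)]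
      simp only [pvGo', List.append_nil]
      rcases Nat.mod_two_eq_zero_or_one (b.count '"') with h | h
      · rw [if_pos h, pvGoOpt_eq_go' none p ps, ← hsp, ih]
        simp [pvRef, h]
      · rw [if_neg (by omega), pvGoOpt_eq_go' (some b) p ps, ← hsp, ih]
        have hcnt : (b ++ [',']).count '"' = b.count '"' := by
          simp [List.count_append]
        simp [pvRef, hcnt, h]
    · rw [if_neg (by simp [hc]), List.modifyHead_cons]
      have hglue : pvGo' b ((c :: p) :: ps) = pvGo' (b ++ [c]) (p :: ps) := by
        simp [pvGo', List.append_assoc]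
      rw [hglue, ← hsp, ih]
      by_cases hq : c = '"'
      · subst hq
        rw [pvCount_parity_quote]
        simp [pvRef]
      · have hcnt : (b ++ [c]).count '"' = b.count '"' := by
          simp [List.count_append, hq]
        simp [pvRef, hcnt, hc, hq]

theorem pvAfold (cs : List Char) (items : List (List Char)) (cur : List Char) (q : Bool) :
    pvFF (if (cs.foldl pvAStep (items, cur, q)).2.1 ≠ [] then
            (cs.foldl pvAStep (items, cur, q)).1 ++ [pvProc (cs.foldl pvAStep (items, cur, q)).2.1]
          else (cs.foldl pvAStep (items, cur, q)).1) =
    pvFF items ++ pvFF ((pvRef cs cur q).map pvProc) := by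
  induction cs generalizing items cur q with
  | nil =>
    simp only [List.foldl_nil, pvRef, List.map_cons, List.map_nil]
    by_cases h : cur = []
    · subst h; simp [pvFF, pvProc_nil]
    · rw [if_pos h]; simp [pvFF, List.filter_append]
  | cons c cs ih =>
    simp only [List.foldl_cons, pvAStep]
    by_cases hq : c = '"'
    · subst hq; rw [if_pos rfl, ih]; simp [pvRef]
    · rw [if_neg hq]
      by_cases hcm : c = ',' ∧ q = false
      · rw [if_pos hcm, ih]
        obtain ⟨hc, hqf⟩ := hcm; subst hc; subst hqf
        have hr : pvRef (',' :: cs) cur false = cur :: pvRef cs [] false := by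
          simp [pvRef]
        simp only [pvFF]
        rw [hr, List.map_cons, List.filter_append, List.append_assoc,
          ← List.filter_append, List.singleton_append]
      · rw [if_neg hcm, ih]
        have : pvRef (c :: cs) cur q = pvRef cs (cur ++ [c]) q := by
          simp [pvRef, hq, hcm]
        rw [this]

-- ===== VERDICT (by name: the statement is the Claim_ definition above) =====
theorem parse_applescript_list_spec : Claim_equal_parse_applescript_list := by
  intro output _
  unfold Spec_parse_applescript_list parse_applescript_list parse_applescript_list_alt
  generalize output.toList = l
  cases l with
  | nil => rfl
  | cons c cs =>
    rw [if_neg (by simp)]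
    rcases hsp : (c :: cs).splitOn ',' with _ | ⟨p, ps⟩
    · exact absurd hsp (pvSplit_ne_nil (c :: cs))
    have hsegs :
        (match ((p :: ps).foldl pvBStep ([], none)).2 with
          | none => ((p :: ps).foldl pvBStep ([], none)).1
          | some b => ((p :: ps).foldl pvBStep ([], none)).1 ++ [b]) =
        pvRef (c :: cs) [] false := by
      rw [pvBfold, pvGoOpt_eq_go' none p ps, ← hsp, pvMain]
      simp
    rw [hsegs]
    have hA := pvAfold (c :: cs) [] [] false
    simp only [pvFF, List.filter_nil, List.nil_append] at hA
    rw [hA]
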